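-- pv_equiv track=rewrite | github.com/Srigamya-99/Alphabet-Rangoli-Program | Alphabet Rangoli.py | print_rangoli
-- ===== SOURCE A (Python) =====
-- def print_rangoli(size):
--     import string
--
--     # Create a list of alphabets
--     alphabets = string.ascii_lowercase
--
--     # Create the first half of the rangoli
--     rangoli_lines = []
--     for i in range(size):
--         # Create a pattern for each line
--         pattern = '-'.join(alphabets[size-1:i:-1] + alphabets[i:size])
--         rangoli_lines.append(pattern.center(4*size - 3, '-'))
--
--     # Create the second half of the rangoli by reversing the first half
--     full_rangoli = rangoli_lines + rangoli_lines[:-1][::-1]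
--
--     # Join all the lines with newline character
--     return '\n'.join(full_rangoli)
-- ===== SOURCE B (Python) =====
-- def print_rangoli(size):
--     import string
--     width = 4 * size - 3
--     rows = []
--     for r in range(2 * size - 1):
--         i = min(r, 2 * size - 2 - r)
--         s = string.ascii_lowercase[i:size]
--         rows.append('-'.join(s[::-1] + s[1:]).center(width, '-'))
--     return '\n'.join(rows)
-- ===== Notes on version B (the rewrite author's own statement) =====
-- stated objective: alternative
-- what changed: A builds the top half in a list (each line joining two alphabet slices) and mirrors it with rangoli_lines[:-1][::-1]; B makes one symmetric pass over all 2*size-1 output rows, computes each row's letter index i = min(r, 2*size-2-r), takes a single slice s = ascii_lowercase[i:size] and builds the palindrome row as '-'.join(s[::-1] + s[1:]), so no half list and no mirrored copy exist.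
import Mathlib
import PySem

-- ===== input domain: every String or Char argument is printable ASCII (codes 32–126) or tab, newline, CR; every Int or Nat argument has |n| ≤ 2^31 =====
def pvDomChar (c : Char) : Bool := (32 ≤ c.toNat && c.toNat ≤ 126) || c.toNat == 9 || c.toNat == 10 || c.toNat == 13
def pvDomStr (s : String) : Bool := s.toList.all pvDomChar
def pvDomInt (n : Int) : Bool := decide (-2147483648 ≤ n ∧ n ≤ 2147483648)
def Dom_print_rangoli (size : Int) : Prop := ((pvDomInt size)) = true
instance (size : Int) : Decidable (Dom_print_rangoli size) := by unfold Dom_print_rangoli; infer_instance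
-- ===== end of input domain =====

-- B replaces A's build-half-then-mirror construction by one symmetric pass over all
-- 2*size-1 rows, each row a palindrome '-'.join(s[::-1] + s[1:]) from one alphabet slice
-- (objective: alternative decomposition, same asymptotic cost).

-- ===== PORT A =====
def pvAlphabets : List Char := "abcdefghijklmnopqrstuvwxyz".toList

-- str.center ported by hand (CPython: marg = width - len, left = marg//2 + (marg & width & 1));
-- exact for every s, w, fill
def pvCenter (s : List Char) (w : Int) (fill : Char) : List Char :=
  if w ≤ (s.length : Int) then s
  else
    let marg := w.toNat - s.length
    let left := marg / 2 + (marg &&& w.toNat &&& 1)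
    List.replicate left fill ++ s ++ List.replicate (marg - left) fill

def print_rangoli (size : Int) : String :=
  let alphabets := pvAlphabets
  let rangoli_lines := (PySem.List.pyRange 0 size 1).foldl
    (fun acc i =>
      -- pattern = '-'.join(alphabets[size-1:i:-1] + alphabets[i:size])
      -- (slice? with step -1 is never none; .getD [] is unreachable)
      let pattern := PySem.Chars.join ['-']
        ((((PySem.List.slice? alphabets (some (size - 1)) (some i) (-1)).getD [])
           ++ PySem.List.slice alphabets (some i) (some size)).map (fun c => [c]))
      acc ++ [pvCenter pattern (4 * size - 3) '-']) []
  -- full_rangoli = rangoli_lines + rangoli_lines[:-1][::-1]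
  let full_rangoli := rangoli_lines ++
    ((PySem.List.slice? (PySem.List.slice rangoli_lines none (some (-1))) none none (-1)).getD [])
  String.ofList (PySem.Chars.join ['\n'] full_rangoli)

-- ===== PORT B =====
def print_rangoli_alt (size : Int) : String :=
  let width := 4 * size - 3
  let rows := (PySem.List.pyRange 0 (2 * size - 1) 1).foldl
    (fun acc r =>
      let i := min r (2 * size - 2 - r)
      let s := PySem.List.slice pvAlphabets (some i) (some size)
      -- '-'.join(s[::-1] + s[1:])  (slice? with step -1 is never none; .getD [] is unreachable)
      let pattern := PySem.Chars.join ['-']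
        ((((PySem.List.slice? s none none (-1)).getD [])
           ++ PySem.List.slice s (some 1) none).map (fun c => [c]))
      acc ++ [pvCenter pattern width '-']) []
  String.ofList (PySem.Chars.join ['\n'] rows)

-- ===== PRECONDITION & SPEC =====
def Spec_print_rangoli (size : Int) (out : String) : Prop := out = print_rangoli_alt size
instance (size : Int) (out : String) : Decidable (Spec_print_rangoli size out) := by unfold Spec_print_rangoli; infer_instance

-- ===== CLAIM (what is proved, stated in full; the proofs are below) =====
def Claim_equal_print_rangoli : Prop := ∀ (size : Int), Dom_print_rangoli size → Spec_print_rangoli size (print_rangoli size)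

-- ===== LEMMAS AND PROOFS =====

-- canonical form of the character sequence of the row whose letter index is i
def pvSeq (n i : Nat) : List Char :=
  (List.range (min n 26 - 1 - i)).map (fun t => Char.ofNat (97 + (min n 26 - 1 - t)))
    ++ (List.range (min n 26 - i)).map (fun t => Char.ofNat (97 + (i + t)))

-- the finished row for letter index i, as both ports produce it
def pvLine (n i : Nat) : List Char :=
  pvCenter (PySem.Chars.join ['-'] ((pvSeq n i).map (fun c => [c]))) (4 * (n : Int) - 3) '-'

theorem pvFoldSnoc {α β : Type} (g : β → α) (l : List β) (a : List α) :
    l.foldl (fun acc x => acc ++ [g x]) a = a ++ l.map g := by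
  induction l generalizing a with
  | nil => simp
  | cons x xs ih => simp [ih]

theorem pvAlphabets_get (j : Nat) (hj : j < 26) : pvAlphabets[j] = Char.ofNat (97 + j) := by
  interval_cases j <;> rfl

theorem pvFilterMap_some_eq_map {α β : Type} (f : α → Option β) (g : α → β) (l : List α)
    (h : ∀ x ∈ l, f x = some (g x)) : l.filterMap f = l.map g := by
  induction l with
  | nil => simp
  | cons x xs ih =>
    simp only [List.filterMap_cons, h x (by simp), List.map_cons]
    rw [ih (fun y hy => h y (by simp [hy]))]

theorem pvSlice1_eq (n i : Nat) (h1 : 1 ≤ n) (h2 : i < n) :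
    (PySem.List.slice? pvAlphabets (some ((n : Int) - 1)) (some (i : Int)) (-1)).getD []
      = (List.range (min n 26 - 1 - i)).map (fun t => Char.ofNat (97 + (min n 26 - 1 - t))) := by
  have hlen : pvAlphabets.length = 26 := rfl
  unfold PySem.List.slice? PySem.List.sliceIndices
  norm_num [hlen]
  rw [if_neg (show ¬n = 0 by omega), if_neg (show ¬(i : Int) < 0 by omega)]
  have hcount : (if (min (i : Int) 25) < min ((n : Int) - 1) 25 then
      ((min ((n : Int) - 1) 25) - min (i : Int) 25).toNat else 0) = min n 26 - 1 - i := by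
    split <;> omega
  rw [hcount]
  apply pvFilterMap_some_eq_map
  intro x hx
  rw [List.mem_range] at hx
  have hidx : ((min ((n : Int) - 1) 25) + -(x : Int)).toNat = min n 26 - 1 - x := by omega
  rw [hidx, List.getElem?_eq_getElem (by omega)]
  exact congrArg some (pvAlphabets_get _ (by omega))

theorem pvSlice2_eq (n i : Nat) (h2 : i < n) :
    PySem.List.slice pvAlphabets (some (i : Int)) (some (n : Int))
      = (List.range (min n 26 - i)).map (fun t => Char.ofNat (97 + (i + t))) := by
  have hlen : pvAlphabets.length = 26 := rfl
  rw [PySem.List.slice_natCast]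
  apply List.ext_getElem
  · simp [hlen]; omega
  · intro t ht1 ht2
    simp only [List.length_take, List.length_drop, hlen] at ht1
    rw [List.getElem_take, List.getElem_drop, List.getElem_map, List.getElem_range]
    exact pvAlphabets_get _ (by omega)

-- B's palindrome s[::-1] ++ s[1:] of s = alphabets[i:size] equals A's canonical sequence
theorem pvB_seq_eq (n i : Nat) (h2 : i < n) :
    ((List.range (min n 26 - i)).map (fun t => Char.ofNat (97 + (i + t)))).reverse
      ++ ((List.range (min n 26 - i)).map (fun t => Char.ofNat (97 + (i + t)))).tail
      = pvSeq n i := by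
  unfold pvSeq
  apply List.ext_getElem
  · simp only [List.length_append, List.length_reverse, List.length_tail, List.length_map,
      List.length_range]
    omega
  · intro j hj1 hj2
    simp only [List.length_append, List.length_reverse, List.length_tail, List.length_map,
      List.length_range] at hj1 hj2
    rw [List.getElem_append, List.getElem_append]
    split
    · rename_i hA
      simp only [List.length_reverse, List.length_map, List.length_range] at hA
      rw [List.getElem_reverse]
      simp only [List.getElem_map, List.getElem_range, List.length_map, List.length_range]
      split
      · rename_i hB
        exact congrArg Char.ofNat (by first
          | (simp only [List.length_append, List.length_reverse, List.length_tail,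
              List.length_map, List.length_range] at *; omega)
          | omega)
      · rename_i hB
        exact congrArg Char.ofNat (by first
          | (simp only [List.length_append, List.length_reverse, List.length_tail,
              List.length_map, List.length_range] at *; omega)
          | omega)
    · rename_i hA
      simp only [List.length_reverse, List.length_map, List.length_range] at hA
      rw [List.getElem_tail]
      simp only [List.getElem_map, List.getElem_range, List.length_map, List.length_range]
      split
      · rename_i hB
        exact congrArg Char.ofNat (by first
          | (simp only [List.length_append, List.length_reverse, List.length_tail,
              List.length_map, List.length_range] at *; omega)
          | omega)
      · rename_i hB
        exact congrArg Char.ofNat (by first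
          | (simp only [List.length_append, List.length_reverse, List.length_tail,
              List.length_map, List.length_range] at *; omega)
          | omega)

theorem pvMirror {α : Type} (g : Nat → α) (n : Nat) (h1 : 1 ≤ n) :
    (List.range n).map g ++ (((List.range n).map g).dropLast).reverse
      = (List.range (2 * n - 1)).map (fun r => g (min r (2 * n - 2 - r))) := by
  apply List.ext_getElem
  · simp; omega
  · intro r h1' h2'
    simp only [List.length_append, List.length_reverse, List.length_dropLast,
      List.length_map, List.length_range] at h1' h2'
    rw [List.getElem_append]
    split
    · rename_i hr
      simp only [List.length_map, List.length_range] at hr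
      simp only [List.getElem_map, List.getElem_range]
      congr 1
      omega
    · rename_i hr
      simp only [List.length_map, List.length_range] at hr
      rw [List.getElem_reverse, List.getElem_dropLast]
      simp only [List.getElem_map, List.getElem_range, List.length_dropLast,
        List.length_map, List.length_range]
      congr 1
      omega

theorem pvALines (n : Nat) (h1 : 1 ≤ n) :
    (PySem.List.pyRange 0 (n : Int) 1).foldl
      (fun acc i =>
        acc ++ [pvCenter (PySem.Chars.join ['-']
          ((((PySem.List.slice? pvAlphabets (some ((n : Int) - 1)) (some i) (-1)).getD [])
             ++ PySem.List.slice pvAlphabets (some i) (some (n : Int))).map (fun c => [c])))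
          (4 * (n : Int) - 3) '-']) []
      = (List.range n).map (fun i => pvLine n i) := by
  rw [PySem.List.pyRange_one]
  have hc : ((n : Int) - 0).toNat = n := by omega
  rw [hc, pvFoldSnoc, List.nil_append, List.map_map]
  apply List.map_congr_left
  intro i hi
  rw [List.mem_range] at hi
  simp only [Function.comp_def, zero_add]
  rw [pvSlice1_eq n i h1 hi, pvSlice2_eq n i hi]
  rfl

theorem pvA_eq (n : Nat) (h1 : 1 ≤ n) :
    print_rangoli (n : Int) = String.ofList (PySem.Chars.join ['\n']
      ((List.range (2 * n - 1)).map (fun r => pvLine n (min r (2 * n - 2 - r))))) := by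
  simp only [print_rangoli]
  rw [pvALines n h1]
  rw [PySem.List.slice_to_neg_one, PySem.List.slice?_none_none_neg_one]
  simp only [Option.getD_some]
  apply congrArg
  apply congrArg
  exact pvMirror (fun i => pvLine n i) n h1

theorem pvB_eq (n : Nat) (h1 : 1 ≤ n) :
    print_rangoli_alt (n : Int) = String.ofList (PySem.Chars.join ['\n']
      ((List.range (2 * n - 1)).map (fun r => pvLine n (min r (2 * n - 2 - r))))) := by
  simp only [print_rangoli_alt, PySem.List.pyRange_one]
  have hc1 : ((2 * (n : Int) - 1) - 0).toNat = 2 * n - 1 := by omega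
  rw [hc1, pvFoldSnoc, List.nil_append, List.map_map]
  apply congrArg
  apply congrArg
  apply List.map_congr_left
  intro r hr
  rw [List.mem_range] at hr
  simp only [Function.comp_def, zero_add]
  set i := min r (2 * n - 2 - r) with hi
  have hiI : min ((r : Nat) : Int) (2 * (n : Int) - 2 - ((r : Nat) : Int)) = ((i : Nat) : Int) := by
    omega
  rw [hiI]
  have hin : i < n := by omega
  rw [pvSlice2_eq n i hin, PySem.List.slice?_none_none_neg_one, Option.getD_some,
    PySem.List.slice_from_one, pvB_seq_eq n i hin]
  rfl

theorem pvEmpty (size : Int) (h : size ≤ 0) :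
    print_rangoli size = print_rangoli_alt size := by
  have h1 : PySem.List.pyRange 0 size 1 = [] := by
    rw [PySem.List.pyRange_one]
    have : (size - 0).toNat = 0 := by omega
    rw [this]
    rfl
  have h2 : PySem.List.pyRange 0 (2 * size - 1) 1 = [] := by
    rw [PySem.List.pyRange_one]
    have : (2 * size - 1 - 0).toNat = 0 := by omega
    rw [this]
    rfl
  simp only [print_rangoli, print_rangoli_alt, h1, h2, List.foldl_nil]
  rw [PySem.List.slice_to_neg_one]
  simp [PySem.List.slice?_none_none_neg_one, PySem.Chars.join_nil]

-- ===== VERDICT (by name: the statement is the Claim_ definition above) =====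
theorem print_rangoli_spec : Claim_equal_print_rangoli := by
  intro size _
  unfold Spec_print_rangoli
  by_cases hpos : 1 ≤ size
  · have hn : size = ((size.toNat : Nat) : Int) := by omega
    rw [hn, pvA_eq size.toNat (by omega), pvB_eq size.toNat (by omega)]
  · exact pvEmpty size (by omega)
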